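-- pv_equiv track=rewrite | github.com/dengguojie/vue-element-admin | auto_schedule/python/tbe/dsl/unify_schedule/vector/reduce/reduce_atomic_schedule.py | _reorder_reduce_last_shape
-- ===== SOURCE A (Python) =====
-- def _reorder_reduce_last_shape(shape_before_reduce,
--                                reduce_axis_index):
--     """
--     reorder shape (a4,r4,a3,r3,a2,r2,a1,r1) to (a4,a3,a2,a1,r4,r3,r2,,r1)
--     :param shape_before_reduce: like (a4,r4,a3,r3,a2,r2,a1,r1)
--     :param reduce_axis_index:
--     :return:
--     """
--     # shape_before_reduce: (a4,r4,a3,r3,a2,r2,a1,r1)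
--     orignal_to_reorder_axis_map = {}
--     reorder_to_orignal_axis_map = {}
--
--     reordered_shape = []
--     temp_axis = 0
--     for i, ele in enumerate(shape_before_reduce):
--         if i not in reduce_axis_index:
--             reordered_shape.append(ele)
--             reorder_to_orignal_axis_map[temp_axis] = i
--             orignal_to_reorder_axis_map[i] = temp_axis
--             temp_axis = temp_axis + 1
--
--     for i, ele in enumerate(shape_before_reduce):
--         if i in reduce_axis_index:
--             reordered_shape.append(ele)
--             reorder_to_orignal_axis_map[temp_axis] = i
--             orignal_to_reorder_axis_map[i] = temp_axis
--             temp_axis = temp_axis + 1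
--
--     return reordered_shape, reorder_to_orignal_axis_map, orignal_to_reorder_axis_map
-- ===== SOURCE B (Python) =====
-- def _reorder_reduce_last_shape(shape_before_reduce,
--                                reduce_axis_index):
--     # Sort-based: sort the axis indices by an injective shifted key that sends
--     # reduce axes after all non-reduce axes, then read everything off the order.
--     n = len(shape_before_reduce)
--     order = sorted(range(n), key=lambda i: i + n if i in reduce_axis_index else i)
--     reordered_shape = [shape_before_reduce[i] for i in order]
--     reorder_to_orignal_axis_map = dict(enumerate(order))
--     orignal_to_reorder_axis_map = {i: new for new, i in enumerate(order)}
--     return reordered_shape, reorder_to_orignal_axis_map, orignal_to_reorder_axis_map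
-- ===== Notes on version B (the rewrite author's own statement) =====
-- stated objective: faster
-- what changed: B replaces A's two interleaved filtered scans with a running counter by a single stable sort of the axis indices under the injective shifted key (i+n for reduce axes, i otherwise), then reads the reordered shape and both axis maps off that sorted order via a comprehension and dict(enumerate(...)); each index pays one membership scan of reduce_axis_index instead of A's two.
import Mathlib
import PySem

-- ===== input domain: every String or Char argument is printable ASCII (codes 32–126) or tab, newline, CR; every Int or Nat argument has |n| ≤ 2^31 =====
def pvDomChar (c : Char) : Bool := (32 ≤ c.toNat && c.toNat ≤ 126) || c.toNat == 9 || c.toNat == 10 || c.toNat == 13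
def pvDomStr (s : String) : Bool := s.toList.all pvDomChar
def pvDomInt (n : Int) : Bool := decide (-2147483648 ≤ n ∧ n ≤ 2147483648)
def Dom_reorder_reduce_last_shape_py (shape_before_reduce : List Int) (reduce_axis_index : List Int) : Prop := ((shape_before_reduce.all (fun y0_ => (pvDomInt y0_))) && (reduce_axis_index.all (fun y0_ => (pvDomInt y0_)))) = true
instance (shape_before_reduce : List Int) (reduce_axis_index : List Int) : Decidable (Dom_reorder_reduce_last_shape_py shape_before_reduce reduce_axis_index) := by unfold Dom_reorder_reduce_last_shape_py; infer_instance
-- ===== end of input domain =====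

-- B sorts the axis indices once under the injective shifted key (i+n for reduce axes, i otherwise)
-- and reads the reordered shape and both axis maps off that order, instead of A's two interleaved
-- filtered scans with a running counter.

-- ===== PORT A =====
-- state: (reordered_shape, reorder_to_orignal_axis_map, orignal_to_reorder_axis_map, temp_axis)
def reorder_reduce_last_shape_py (shape_before_reduce : List Int) (reduce_axis_index : List Int) :
    List Int × (List (Int × Int)) × (List (Int × Int)) :=
  let step : (List Int × PySem.Dict Int Int × PySem.Dict Int Int × Int) → (Int × Int) →
      (List Int × PySem.Dict Int Int × PySem.Dict Int Int × Int) := fun st p =>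
    (st.1 ++ [p.2], st.2.1.insert st.2.2.2 p.1, st.2.2.1.insert p.1 st.2.2.2, st.2.2.2 + 1)
  let st1 := (PySem.List.enumerate shape_before_reduce).foldl
    (fun st p => if !reduce_axis_index.contains p.1 then step st p else st)
    ([], PySem.Dict.empty, PySem.Dict.empty, 0)
  let st2 := (PySem.List.enumerate shape_before_reduce).foldl
    (fun st p => if reduce_axis_index.contains p.1 then step st p else st) st1
  (st2.1, st2.2.1.items, st2.2.2.1.items)

-- ===== PORT B =====
-- shape_before_reduce[i] is always in range (i comes from range(len(...))), ported as pyGetD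
def reorder_reduce_last_shape_py_alt (shape_before_reduce : List Int) (reduce_axis_index : List Int) :
    List Int × (List (Int × Int)) × (List (Int × Int)) :=
  let n : Int := (shape_before_reduce.length : Int)
  let order := PySem.List.sorted (PySem.List.pyRange 0 n 1)
    (fun i => if reduce_axis_index.contains i then i + n else i) false
  let reordered_shape := order.map (fun i => PySem.List.pyGetD shape_before_reduce i 0)
  let m1 := PySem.Dict.ofList (PySem.List.enumerate order)
  let m2 := PySem.Dict.ofList ((PySem.List.enumerate order).map (fun p => (p.2, p.1)))
  (reordered_shape, m1.items, m2.items)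

-- ===== PRECONDITION & SPEC =====
def Spec_reorder_reduce_last_shape_py (shape_before_reduce : List Int) (reduce_axis_index : List Int) (out : List Int × (List (Int × Int)) × (List (Int × Int))) : Prop := out = reorder_reduce_last_shape_py_alt shape_before_reduce reduce_axis_index
instance (shape_before_reduce : List Int) (reduce_axis_index : List Int) (out : List Int × (List (Int × Int)) × (List (Int × Int))) : Decidable (Spec_reorder_reduce_last_shape_py shape_before_reduce reduce_axis_index out) := by unfold Spec_reorder_reduce_last_shape_py; infer_instance

-- ===== CLAIM (what is proved, stated in full; the proofs are below) =====
def Claim_equal_reorder_reduce_last_shape_py : Prop := ∀ (shape_before_reduce : List Int) (reduce_axis_index : List Int), Dom_reorder_reduce_last_shape_py shape_before_reduce reduce_axis_index → Spec_reorder_reduce_last_shape_py shape_before_reduce reduce_axis_index (reorder_reduce_last_shape_py shape_before_reduce reduce_axis_index)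

-- ===== LEMMAS AND PROOFS =====

-- B's stable sort under the shifted key IS the partition: non-reduce indices in order, then reduce indices.
lemma sorted_shift (r : List Int) (n : Nat) :
    PySem.List.sorted (PySem.List.pyRange 0 (n : Int) 1)
        (fun i => if r.contains i then i + (n : Int) else i) false
      = (PySem.List.pyRange 0 (n : Int) 1).filter (fun i => !r.contains i)
        ++ (PySem.List.pyRange 0 (n : Int) 1).filter (fun i => r.contains i) := by
  have hpw : (PySem.List.pyRange 0 (n : Int) 1).Pairwise (· < ·) := by
    rw [show ((1 : Int) = 1) from rfl] at *
    rw [show PySem.List.pyRange 0 (n : Int) 1 = PySem.List.pyRange 0 (n : Int) from rfl,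
        PySem.List.pyRange_zero_natCast]
    exact List.pairwise_map.mpr (List.pairwise_lt_range.imp (by intro a b h; exact_mod_cast h))
  have hbound : ∀ i ∈ PySem.List.pyRange 0 (n : Int) 1, 0 ≤ i ∧ i < (n : Int) := by
    intro i hi
    rw [PySem.List.mem_pyRange_one] at hi
    exact hi
  apply PySem.List.sorted_eq_of_perm_of_pairwise_lt
  · -- permutation
    have := List.filter_append_perm (fun i => !r.contains i) (PySem.List.pyRange 0 (n : Int) 1)
    simpa using this
  · -- strictly increasing keys along the target list
    rw [List.pairwise_append]
    refine ⟨?_, ?_, ?_⟩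
    · refine (hpw.filter _).imp_of_mem ?_
      intro a b ha hb hab
      have ha' := (List.mem_filter.mp ha).2
      have hb' := (List.mem_filter.mp hb).2
      simp only [Bool.not_eq_true'] at ha' hb'
      rw [if_neg (fun h => Bool.false_ne_true (ha' ▸ h)), if_neg (fun h => Bool.false_ne_true (hb' ▸ h))]
      exact hab
    · refine (hpw.filter _).imp_of_mem ?_
      intro a b ha hb hab
      have ha' := (List.mem_filter.mp ha).2
      have hb' := (List.mem_filter.mp hb).2
      rw [if_pos ha', if_pos hb']
      omega
    · intro a ha b hb
      have ha' := List.mem_filter.mp ha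
      have hb' := List.mem_filter.mp hb
      have h1 := hbound a ha'.1
      have h2 := hbound b hb'.1
      have ha'' := ha'.2
      simp only [Bool.not_eq_true'] at ha''
      rw [if_neg (fun h => Bool.false_ne_true (ha'' ▸ h)), if_pos hb'.2]
      omega

-- A's unconditional step over the ordered index/element pairs equals B's three reads of the order,
-- with A's running counter tracking the enumerate position.
lemma core_foldl (s : List Int) (order : List Int) (acc : List Int)
    (d1 d2 : PySem.Dict Int Int) (t : Int) :
    (order.map (fun j => (j, PySem.List.pyGetD s j 0))).foldl
        (fun (st : List Int × PySem.Dict Int Int × PySem.Dict Int Int × Int) p =>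
          (st.1 ++ [p.2], st.2.1.insert st.2.2.2 p.1, st.2.2.1.insert p.1 st.2.2.2, st.2.2.2 + 1))
        (acc, d1, d2, t)
      = (acc ++ order.map (fun j => PySem.List.pyGetD s j 0),
         (PySem.List.enumerate order t).foldl (fun d (p : Int × Int) => d.insert p.1 p.2) d1,
         (PySem.List.enumerate order t).foldl (fun d (p : Int × Int) => d.insert p.2 p.1) d2,
         t + (order.length : Int)) := by
  induction order generalizing acc d1 d2 t with
  | nil => simp [PySem.List.enumerate_nil]
  | cons x tl ih =>
    simp only [List.map_cons, List.foldl_cons, PySem.List.enumerate_cons, ih, List.length_cons]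
    simp only [Prod.mk.injEq]
    refine ⟨by simp, trivial, trivial, by push_cast; ring⟩

-- ===== VERDICT (by name: the statement is the Claim_ definition above) =====
theorem reorder_reduce_last_shape_py_spec : Claim_equal_reorder_reduce_last_shape_py := by
  intro s r _
  show reorder_reduce_last_shape_py s r = reorder_reduce_last_shape_py_alt s r
  unfold reorder_reduce_last_shape_py reorder_reduce_last_shape_py_alt
  simp only [sorted_shift r s.length]
  rw [PySem.List.foldl_if_eq_foldl_filter, PySem.List.foldl_if_eq_foldl_filter,
      ← List.foldl_append]
  rw [PySem.List.enumerate_eq_map_pyRange (d := 0)]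
  simp only [List.filter_map, Function.comp_def, ← List.map_append, PySem.List.len_eq]
  rw [core_foldl]
  have hswap : ∀ l : List (Int × Int),
      PySem.Dict.ofList (l.map (fun p => (p.2, p.1)))
        = l.foldl (fun d (p : Int × Int) => d.insert p.2 p.1) PySem.Dict.empty := by
    intro l
    show (l.map (fun p => (p.2, p.1))).foldl
        (fun d (p : Int × Int) => d.insert p.1 p.2) PySem.Dict.empty = _
    rw [List.foldl_map]
  simp only [Prod.mk.injEq]
  refine ⟨by simp, rfl, ?_⟩
  rw [hswap]
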